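-- pv_equiv track=rewrite | github.com/jachetblix/CsAcademy-Hackerrank-solutions | jarawiAndTheInterview/main.py | size_suffix
-- ===== SOURCE A (Python) =====
-- def size_suffix(temp_suffix, suffix_size, main_string):
--     for j in main_string:
--         if len(temp_suffix) == 0:
--             break
--         elif j == temp_suffix[0]:
--             suffix_size +=1
--             temp_suffix = temp_suffix[1:]
--     return suffix_size
-- ===== SOURCE B (Python) =====
-- def size_suffix(temp_suffix, suffix_size, main_string):
--     it = iter(main_string)
--     for c in temp_suffix:
--         for x in it:
--             if x == c:
--                 suffix_size += 1
--                 break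
--         else:
--             break
--     return suffix_size
-- ===== Notes on version B (the rewrite author's own statement) =====
-- stated objective: faster
-- what changed: B loops over the pattern temp_suffix and consumes a shared iterator of main_string (find-next-occurrence per pattern char), instead of A's single pass over main_string carrying the shrinking pattern via repeated slicing.
import Mathlib
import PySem

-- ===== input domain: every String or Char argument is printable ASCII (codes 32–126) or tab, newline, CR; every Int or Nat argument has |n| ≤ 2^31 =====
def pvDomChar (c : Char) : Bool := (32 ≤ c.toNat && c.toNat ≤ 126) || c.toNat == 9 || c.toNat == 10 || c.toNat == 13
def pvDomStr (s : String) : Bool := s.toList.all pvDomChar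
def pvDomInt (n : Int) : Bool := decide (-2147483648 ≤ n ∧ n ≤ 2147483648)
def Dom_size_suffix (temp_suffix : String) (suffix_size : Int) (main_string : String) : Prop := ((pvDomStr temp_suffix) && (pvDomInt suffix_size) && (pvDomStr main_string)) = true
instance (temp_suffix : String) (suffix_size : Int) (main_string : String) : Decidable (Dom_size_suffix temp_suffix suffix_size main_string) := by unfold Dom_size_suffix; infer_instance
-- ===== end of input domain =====

-- B reverses the traversal: it loops over the pattern and consumes one shared stream of
-- main_string (next-occurrence search per pattern char) instead of A's single pass over
-- main_string carrying the shrinking pattern as state; objective: alternative decomposition.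

-- ===== PORT A =====
-- A's loop over main_string, state = (remaining temp_suffix, suffix_size)
def sizeSuffixLoopA : List Char → List Char → Int → Int
  | [], _, acc => acc
  | _ :: _, [], acc => acc                 -- len(temp_suffix) == 0: break
  | j :: ms, t :: ts, acc =>
      if j == t then sizeSuffixLoopA ms ts (acc + 1)   -- j == temp_suffix[0]
      else sizeSuffixLoopA ms (t :: ts) acc

def size_suffix (temp_suffix : String) (suffix_size : Int) (main_string : String) : Int :=
  sizeSuffixLoopA main_string.toList temp_suffix.toList suffix_size

-- ===== PORT B =====
-- inner `for x in it:` — consume the stream until the first x == c; none = exhausted (for-else break)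
def sizeSuffixConsume (c : Char) : List Char → Option (List Char)
  | [] => none
  | x :: xs => if x == c then some xs else sizeSuffixConsume c xs

-- outer loop over the pattern
def sizeSuffixLoopB : List Char → List Char → Int → Int
  | [], _, acc => acc
  | c :: cs, stream, acc =>
      match sizeSuffixConsume c stream with
      | none => acc
      | some rest => sizeSuffixLoopB cs rest (acc + 1)

def size_suffix_alt (temp_suffix : String) (suffix_size : Int) (main_string : String) : Int :=
  sizeSuffixLoopB temp_suffix.toList main_string.toList suffix_size

-- ===== PRECONDITION & SPEC =====
def Spec_size_suffix (temp_suffix : String) (suffix_size : Int) (main_string : String) (out : Int) : Prop := out = size_suffix_alt temp_suffix suffix_size main_string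
instance (temp_suffix : String) (suffix_size : Int) (main_string : String) (out : Int) : Decidable (Spec_size_suffix temp_suffix suffix_size main_string out) := by unfold Spec_size_suffix; infer_instance

-- ===== CLAIM (what is proved, stated in full; the proofs are below) =====
def Claim_equal_size_suffix : Prop := ∀ (temp_suffix : String) (suffix_size : Int) (main_string : String), Dom_size_suffix temp_suffix suffix_size main_string → Spec_size_suffix temp_suffix suffix_size main_string (size_suffix temp_suffix suffix_size main_string)

-- ===== LEMMAS AND PROOFS =====
theorem loopA_eq_loopB (m t : List Char) (acc : Int) :
    sizeSuffixLoopA m t acc = sizeSuffixLoopB t m acc := by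
  induction m generalizing t acc with
  | nil =>
    cases t with
    | nil => simp [sizeSuffixLoopA, sizeSuffixLoopB]
    | cons c cs => simp [sizeSuffixLoopA, sizeSuffixLoopB, sizeSuffixConsume]
  | cons j ms ih =>
    cases t with
    | nil => simp [sizeSuffixLoopA, sizeSuffixLoopB]
    | cons c cs =>
      by_cases h : j == c
      · simp [sizeSuffixLoopA, sizeSuffixLoopB, sizeSuffixConsume, h, ih]
      · simp only [sizeSuffixLoopA, sizeSuffixLoopB, sizeSuffixConsume, h]
        rw [ih (c :: cs) acc]
        simp [sizeSuffixLoopB]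

-- ===== VERDICT (by name: the statement is the Claim_ definition above) =====
theorem size_suffix_spec : Claim_equal_size_suffix := by
  intro t s m _
  unfold Spec_size_suffix size_suffix size_suffix_alt
  exact loopA_eq_loopB m.toList t.toList s
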